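-- pv_equiv track=rewrite | github.com/AlfredHolley/drag-and-generate-report | backend/pdf_generator/pdf_builder.py | _has_or_needs_explanations
-- ===== SOURCE A (Python) =====
-- def _has_or_needs_explanations(parameters):
--     """Check if any parameter has explanation or is a special parameter that will get one"""
--     # List of special parameters that will always get explanations
--     special_params = [
--         'DHEA', 'DHYDROEPIANDROSTERONE', 'DEHYDROEPIANDROSTERONE',
--         'FSH', 'FOLLICLE-STIMULATING HORMONE',
--         'LH', 'LEUTENISING HORMONE', 'LUTEINIZING HORMONE',
--         'SHBG', 'SEX HORMONE BINDING GLOBULIN', 'SEX HORMON BINDING GLOBULIN',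
--         'ESTRADIOL', '17-BETA', '17 BETA', 'BETA ESTRADIOL',
--         'PROGESTERONE',
--         'SOMATOMEDIN', 'IGF-1', 'IGF1',
--         'TOTAL TESTOSTERONE', 'BIOAVAILABLE TESTOSTERONE',
--         'CORTISOL', 'HYDROCORTISONE',
--         'TSH', 'THYROTROPIN', 'TIROTROPIN',
--         'FREE THYROXINE', 'THYROXINE',
--         'T3', 'FREE T3', 'T3 FREE', 'TRIIODOTHYRONINE',
--         'HGH', 'HUMAN GROWTH HORMONE', 'GROWTH HORMONE',
--         'FREE PSA/TOTAL PSA', 'PSA INDEX', 'PSA RATIO',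
--         'ANDROSTENEDIONE', 'DELTA 4', 'DELTA-4',
--         '25-HYDROXYVITAMIN D', 'VITAMIN D', '25-OH'
--     ]
--
--     for param in parameters:
--         # Check if parameter already has explanation
--         if param.get('explanation'):
--             return True
--
--         # Check if parameter is a special one that will get an explanation
--         param_name = param.get('english_name', '').upper()
--         for special in special_params:
--             if special in param_name:
--                 return True
--
--     return False
-- ===== SOURCE B (Python) =====
-- _SPECIAL_PARAMS = [
--     'DHEA', 'DHYDROEPIANDROSTERONE', 'DEHYDROEPIANDROSTERONE',
--     'FSH', 'FOLLICLE-STIMULATING HORMONE',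
--     'LH', 'LEUTENISING HORMONE', 'LUTEINIZING HORMONE',
--     'SHBG', 'SEX HORMONE BINDING GLOBULIN', 'SEX HORMON BINDING GLOBULIN',
--     'ESTRADIOL', '17-BETA', '17 BETA', 'BETA ESTRADIOL',
--     'PROGESTERONE',
--     'SOMATOMEDIN', 'IGF-1', 'IGF1',
--     'TOTAL TESTOSTERONE', 'BIOAVAILABLE TESTOSTERONE',
--     'CORTISOL', 'HYDROCORTISONE',
--     'TSH', 'THYROTROPIN', 'TIROTROPIN',
--     'FREE THYROXINE', 'THYROXINE',
--     'T3', 'FREE T3', 'T3 FREE', 'TRIIODOTHYRONINE',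
--     'HGH', 'HUMAN GROWTH HORMONE', 'GROWTH HORMONE',
--     'FREE PSA/TOTAL PSA', 'PSA INDEX', 'PSA RATIO',
--     'ANDROSTENEDIONE', 'DELTA 4', 'DELTA-4',
--     '25-HYDROXYVITAMIN D', 'VITAMIN D', '25-OH',
-- ]
--
-- # multi-pattern matcher: keywords indexed by their first character, so each
-- # name is scanned once left-to-right, testing only the keywords that could
-- # start at the current position
-- _BY_FIRST = {}
-- for _sp in _SPECIAL_PARAMS:
--     _BY_FIRST.setdefault(_sp[0], []).append(_sp)
--
--
-- def _mentions_special(name):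
--     for i, ch in enumerate(name):
--         for sp in _BY_FIRST.get(ch, ()):
--             if name.startswith(sp, i):
--                 return True
--     return False
--
--
-- def _has_or_needs_explanations(parameters):
--     """Check if any parameter has explanation or is a special parameter that will get one"""
--     for param in parameters:
--         if param.get('explanation'):
--             return True
--         if _mentions_special(param.get('english_name', '').upper()):
--             return True
--     return False
-- ===== Notes on version B (the rewrite author's own statement) =====
-- stated objective: alternative
-- what changed: Replaces A's per-keyword substring search (each of the 45 keywords scanned over the whole name with 'in') by a multi-pattern matcher: the keywords are grouped once into a dict indexed by first character, and each name is scanned once left-to-right, prefix-testing only the keywords whose first character matches the current position.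
import Mathlib
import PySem

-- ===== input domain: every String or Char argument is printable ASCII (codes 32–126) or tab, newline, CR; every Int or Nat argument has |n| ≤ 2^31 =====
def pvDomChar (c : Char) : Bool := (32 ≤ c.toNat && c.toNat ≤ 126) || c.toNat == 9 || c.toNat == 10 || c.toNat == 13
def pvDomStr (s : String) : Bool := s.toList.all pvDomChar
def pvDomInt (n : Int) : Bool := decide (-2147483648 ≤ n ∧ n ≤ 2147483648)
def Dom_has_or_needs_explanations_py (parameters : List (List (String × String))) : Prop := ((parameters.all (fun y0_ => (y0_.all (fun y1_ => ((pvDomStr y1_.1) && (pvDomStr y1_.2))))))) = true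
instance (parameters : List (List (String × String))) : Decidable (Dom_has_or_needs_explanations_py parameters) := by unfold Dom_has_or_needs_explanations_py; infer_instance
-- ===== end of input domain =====

-- B replaces A's per-keyword substring search with a multi-pattern matcher: the keywords
-- are grouped by first character in a dict built once, and each name is scanned once
-- left-to-right, prefix-testing only the keywords that could start at the current position
-- (alternative decomposition; return value only — no mutation).

-- the literal special_params list, shared by both sources
def pvSpecials : List String :=
  ["DHEA", "DHYDROEPIANDROSTERONE", "DEHYDROEPIANDROSTERONE",
   "FSH", "FOLLICLE-STIMULATING HORMONE",
   "LH", "LEUTENISING HORMONE", "LUTEINIZING HORMONE",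
   "SHBG", "SEX HORMONE BINDING GLOBULIN", "SEX HORMON BINDING GLOBULIN",
   "ESTRADIOL", "17-BETA", "17 BETA", "BETA ESTRADIOL",
   "PROGESTERONE",
   "SOMATOMEDIN", "IGF-1", "IGF1",
   "TOTAL TESTOSTERONE", "BIOAVAILABLE TESTOSTERONE",
   "CORTISOL", "HYDROCORTISONE",
   "TSH", "THYROTROPIN", "TIROTROPIN",
   "FREE THYROXINE", "THYROXINE",
   "T3", "FREE T3", "T3 FREE", "TRIIODOTHYRONINE",
   "HGH", "HUMAN GROWTH HORMONE", "GROWTH HORMONE",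
   "FREE PSA/TOTAL PSA", "PSA INDEX", "PSA RATIO",
   "ANDROSTENEDIONE", "DELTA 4", "DELTA-4",
   "25-HYDROXYVITAMIN D", "VITAMIN D", "25-OH"]

-- truthiness of dict.get('explanation'): None and '' are falsy, any other str truthy
def pvTruthy (o : Option String) : Bool :=
  match o with
  | none => false
  | some s => !(s == "")

-- ===== PORT A =====
-- inner 'for special in special_params: if special in param_name: return True'
def pvInnerA (specials : List String) (paramName : String) : Bool :=
  match specials with
  | [] => false
  | s :: rest => if PySem.Str.isIn s paramName then true else pvInnerA rest paramName

def has_or_needs_explanations_py (parameters : List (List (String × String))) : Bool :=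
  match parameters with
  | [] => false
  | p :: rest =>
    if pvTruthy ((PySem.Dict.mk p).get? "explanation") then true
    else
      let paramName := PySem.Str.upper ((PySem.Dict.mk p).getD "english_name" "")
      if pvInnerA pvSpecials paramName then true
      else has_or_needs_explanations_py rest

-- ===== PORT B =====
-- module-level '_BY_FIRST.setdefault(_sp[0], []).append(_sp)' loop (every keyword is
-- non-empty, so _sp[0] never raises; the match on toList mirrors that indexing)
def pvBucketStep (d : PySem.Dict Char (List String)) (sp : String) : PySem.Dict Char (List String) :=
  match sp.toList with
  | [] => d
  | c :: _ => d.insert c (d.getD c [] ++ [sp])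

def pvBuckets : PySem.Dict Char (List String) :=
  pvSpecials.foldl pvBucketStep PySem.Dict.empty

-- '_mentions_special': the index loop 'for i, ch in enumerate(name)' is ported as
-- structural recursion over the remaining suffix of the name ('name.startswith(sp, i)'
-- is exactly 'the suffix from i starts with sp'), exact for 0 ≤ i < len(name)
def pvScan (tail : List Char) : Bool :=
  match tail with
  | [] => false
  | c :: rest =>
    if (pvBuckets.getD c []).any (fun sp => PySem.Chars.startswith (c :: rest) sp.toList) then true
    else pvScan rest

def has_or_needs_explanations_py_alt (parameters : List (List (String × String))) : Bool :=
  match parameters with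
  | [] => false
  | p :: rest =>
    if pvTruthy ((PySem.Dict.mk p).get? "explanation") then true
    else if pvScan (PySem.Str.upper ((PySem.Dict.mk p).getD "english_name" "")).toList then true
    else has_or_needs_explanations_py_alt rest

-- ===== PRECONDITION & SPEC =====
def Spec_has_or_needs_explanations_py (parameters : List (List (String × String))) (out : Bool) : Prop := out = has_or_needs_explanations_py_alt parameters
instance (parameters : List (List (String × String))) (out : Bool) : Decidable (Spec_has_or_needs_explanations_py parameters out) := by unfold Spec_has_or_needs_explanations_py; infer_instance

-- ===== CLAIM (what is proved, stated in full; the proofs are below) =====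
def Claim_equal_has_or_needs_explanations_py : Prop := ∀ (parameters : List (List (String × String))), Dom_has_or_needs_explanations_py parameters → Spec_has_or_needs_explanations_py parameters (has_or_needs_explanations_py parameters)

-- ===== LEMMAS AND PROOFS =====

-- every keyword is a non-empty string
theorem pvSpecials_ne_nil : ∀ sp ∈ pvSpecials, sp.toList ≠ [] := by decide

-- membership in a bucket of the first-character index
theorem pvBucket_foldl_mem (l : List String) (d : PySem.Dict Char (List String))
    (c : Char) (sp : String) :
    sp ∈ (l.foldl pvBucketStep d).getD c [] ↔
      sp ∈ d.getD c [] ∨ (sp ∈ l ∧ sp.toList.head? = some c) := by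
  induction l generalizing d with
  | nil => simp
  | cons x xs ih =>
    rw [List.foldl_cons, ih]
    unfold pvBucketStep
    cases hx : x.toList with
    | nil =>
      constructor
      · rintro (h | ⟨hm, hh⟩)
        · exact Or.inl h
        · exact Or.inr ⟨List.mem_cons_of_mem _ hm, hh⟩
      · rintro (h | ⟨hm, hh⟩)
        · exact Or.inl h
        · rcases List.mem_cons.mp hm with rfl | hm'
          · rw [hx] at hh; simp at hh
          · exact Or.inr ⟨hm', hh⟩
    | cons c' t =>
      have hxh : x.toList.head? = some c' := by rw [hx]; rfl
      rw [PySem.Dict.getD_insert]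
      by_cases hc : c = c'
      · subst hc
        rw [if_pos rfl]
        simp only [List.mem_append, List.mem_cons, List.not_mem_nil, or_false]
        constructor
        · rintro ((h | rfl) | ⟨hm, hh⟩)
          · exact Or.inl h
          · exact Or.inr ⟨Or.inl rfl, hxh⟩
          · exact Or.inr ⟨Or.inr hm, hh⟩
        · rintro (h | ⟨rfl | hm, hh⟩)
          · exact Or.inl (Or.inl h)
          · exact Or.inl (Or.inr rfl)
          · exact Or.inr ⟨hm, hh⟩
      · rw [if_neg hc]
        constructor
        · rintro (h | ⟨hm, hh⟩)
          · exact Or.inl h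
          · exact Or.inr ⟨List.mem_cons_of_mem _ hm, hh⟩
        · rintro (h | ⟨hm, hh⟩)
          · exact Or.inl h
          · rcases List.mem_cons.mp hm with rfl | hm'
            · rw [hxh] at hh
              exact absurd (Option.some.inj hh).symm hc
            · exact Or.inr ⟨hm', hh⟩

theorem pvBuckets_mem (c : Char) (sp : String) :
    sp ∈ pvBuckets.getD c [] ↔ sp ∈ pvSpecials ∧ sp.toList.head? = some c := by
  rw [pvBuckets, pvBucket_foldl_mem]
  simp [PySem.Dict.getD_empty]

-- B's scan finds exactly the names having some keyword as a prefix of some suffix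
theorem pvScan_iff (cs : List Char) :
    pvScan cs = true ↔ ∃ sp ∈ pvSpecials, ∃ j, sp.toList <+: cs.drop j := by
  induction cs with
  | nil =>
    simp only [pvScan, Bool.false_eq_true, false_iff]
    rintro ⟨sp, hsp, j, hpre⟩
    exact pvSpecials_ne_nil sp hsp (List.prefix_nil.mp (by simpa using hpre))
  | cons c rest ih =>
    rw [pvScan]
    constructor
    · intro h
      split_ifs at h with hb
      · rcases List.any_eq_true.mp hb with ⟨sp, hmem, hsw⟩
        rcases (pvBuckets_mem c sp).mp hmem with ⟨hsp, _⟩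
        exact ⟨sp, hsp, 0, (PySem.Chars.startswith_iff _ _).mp hsw⟩
      · rcases ih.mp h with ⟨sp, hsp, j, hpre⟩
        exact ⟨sp, hsp, j + 1, by simpa using hpre⟩
    · rintro ⟨sp, hsp, j, hpre⟩
      cases j with
      | zero =>
        have hhead : sp.toList.head? = some c := by
          cases hx : sp.toList with
          | nil => exact absurd hx (pvSpecials_ne_nil sp hsp)
          | cons c' t =>
            rw [hx] at hpre
            rcases hpre with ⟨u, hu⟩
            simp only [List.drop_zero] at hu
            injection hu with h1 _
            rw [h1]; rfl
        have hb : (pvBuckets.getD c []).any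
            (fun sp => PySem.Chars.startswith (c :: rest) sp.toList) = true :=
          List.any_eq_true.mpr ⟨sp, (pvBuckets_mem c sp).mpr ⟨hsp, hhead⟩,
            (PySem.Chars.startswith_iff _ _).mpr (by simpa using hpre)⟩
        rw [if_pos hb]
      | succ j =>
        have : pvScan rest = true := ih.mpr ⟨sp, hsp, j, by simpa using hpre⟩
        rw [this]; split_ifs <;> rfl

-- A's inner loop finds exactly the names containing some keyword as a substring
theorem pvInnerA_iff (name : String) :
    pvInnerA pvSpecials name = true ↔ ∃ sp ∈ pvSpecials, ∃ j, sp.toList <+: name.toList.drop j := by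
  have hgen : ∀ l : List String,
      pvInnerA l name = true ↔ ∃ sp ∈ l, PySem.Str.isIn sp name = true := by
    intro l
    induction l with
    | nil => simp [pvInnerA]
    | cons s rest ih =>
      rw [pvInnerA]
      split_ifs with h
      · simp only [true_iff]
        exact ⟨s, List.mem_cons_self, h⟩
      · rw [ih]
        constructor
        · rintro ⟨sp, hm, hin⟩; exact ⟨sp, List.mem_cons_of_mem _ hm, hin⟩
        · rintro ⟨sp, hm, hin⟩
          rcases List.mem_cons.mp hm with rfl | hm'
          · exact absurd hin (by simpa using h)
          · exact ⟨sp, hm', hin⟩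
  rw [hgen]
  constructor
  · rintro ⟨sp, hm, hin⟩
    refine ⟨sp, hm, ?_⟩
    have := (PySem.Str.isIn_iff_infix _ _).mp hin
    exact (PySem.Chars.exists_prefix_drop_iff_isIn _ _).mpr
      ((PySem.Chars.isIn_iff_infix _ _).mpr this)
  · rintro ⟨sp, hm, hj⟩
    refine ⟨sp, hm, ?_⟩
    exact (PySem.Str.isIn_iff_infix _ _).mpr
      ((PySem.Chars.isIn_iff_infix _ _).mp
        ((PySem.Chars.exists_prefix_drop_iff_isIn _ _).mp hj))

-- per-name agreement of the two inner algorithms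
theorem pvInner_eq_scan (name : String) :
    pvInnerA pvSpecials name = pvScan name.toList := by
  rw [Bool.eq_iff_iff, pvInnerA_iff, pvScan_iff]

-- the two ports agree on every input (proved below the claim; Dom is not needed)
theorem pvAB_eq (parameters : List (List (String × String))) :
    has_or_needs_explanations_py parameters = has_or_needs_explanations_py_alt parameters := by
  induction parameters with
  | nil => rfl
  | cons p rest ih =>
    simp only [has_or_needs_explanations_py, has_or_needs_explanations_py_alt,
      pvInner_eq_scan, ih]

-- ===== VERDICT (by name: the statement is the Claim_ definition above) =====
theorem has_or_needs_explanations_py_spec : Claim_equal_has_or_needs_explanations_py := by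
  intro parameters _
  exact pvAB_eq parameters
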